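-- pv_equiv track=rewrite | github.com/MaurizioFD/RecSys_Course_AT_PoliMi | Recommenders/Neural/architecture_utils.py | get_number_autoencoder_parameters
-- ===== SOURCE A (Python) =====
-- def get_number_autoencoder_parameters(decoder_architecture):
--     """
--     Calculate the number of parameters for an autoencoder, given the decoder network.
--     The decoder network should be in the form: [encoding_size, hidden_layer_1, ... , output_size] with sizes strictly increasing
--
--     Number of parameters for a dense layer: num_params = (input_size + 1) * output_size
--
--     :param decoder_architecture:
--     :return:
--     """
--
--     full_architecture = decoder_architecture[1:]
--     full_architecture.reverse()
--     full_architecture.extend(decoder_architecture)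
--
--     n_parameters = 0
--
--     for input_size, output_size in zip(full_architecture, full_architecture[1:]):
--         n_parameters += (input_size + 1) * output_size
--
--     return n_parameters
-- ===== SOURCE B (Python) =====
-- def get_number_autoencoder_parameters(decoder_architecture):
--     """Single iterative pass over the original list: for each adjacent pair add
--     both the decoder-direction and the mirrored encoder-direction dense-layer
--     cost, without building the reversed+concatenated full architecture."""
--     total = 0
--     prev = None
--     for y in decoder_architecture:
--         if prev is not None:
--             total += (prev + 1) * y + (y + 1) * prev
--         prev = y
--     return total
-- ===== Notes on version B (the rewrite author's own statement) =====
-- stated objective: simpler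
-- what changed: B never constructs the reversed slice or the concatenated full architecture: it recurses once over the original decoder list, adding for each adjacent pair (x,y) both the decoder cost (x+1)*y and the mirrored encoder cost (y+1)*x.
import Mathlib
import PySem

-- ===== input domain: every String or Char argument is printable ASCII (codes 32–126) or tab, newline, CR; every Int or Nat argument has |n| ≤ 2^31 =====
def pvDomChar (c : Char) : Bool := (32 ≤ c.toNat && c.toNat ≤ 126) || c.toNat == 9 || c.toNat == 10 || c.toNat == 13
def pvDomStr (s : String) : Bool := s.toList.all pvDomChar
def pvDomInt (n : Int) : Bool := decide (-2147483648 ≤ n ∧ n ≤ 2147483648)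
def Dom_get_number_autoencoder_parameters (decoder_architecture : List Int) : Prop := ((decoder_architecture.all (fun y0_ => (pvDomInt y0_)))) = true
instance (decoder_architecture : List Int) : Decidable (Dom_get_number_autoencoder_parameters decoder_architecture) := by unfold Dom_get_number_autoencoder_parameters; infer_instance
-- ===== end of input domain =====

-- B replaces A's reversed+concatenated architecture by one recursion over the
-- original list adding both direction costs per adjacent pair (objective: simpler).

-- ===== PORT A =====
def get_number_autoencoder_parameters (decoder_architecture : List Int) : Int :=
  -- full_architecture = decoder_architecture[1:]; reverse(); extend(decoder_architecture)
  let full_architecture := (PySem.List.slice decoder_architecture (some 1) none).reverse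
                             ++ decoder_architecture
  -- for input_size, output_size in zip(full_architecture, full_architecture[1:])
  (full_architecture.zip (PySem.List.slice full_architecture (some 1) none)).foldl
    (fun n_parameters p => n_parameters + (p.1 + 1) * p.2) 0

-- ===== PORT B =====
-- one pass: state (total, prev); add both direction costs per adjacent pair
def get_number_autoencoder_parameters_alt (decoder_architecture : List Int) : Int :=
  (decoder_architecture.foldl
    (fun st y =>
      match st.2 with
      | some prev => (st.1 + (prev + 1) * y + (y + 1) * prev, some y)
      | none => (st.1, some y))
    ((0 : Int), (none : Option Int))).1

-- ===== PRECONDITION & SPEC =====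
def Spec_get_number_autoencoder_parameters (decoder_architecture : List Int) (out : Int) : Prop := out = get_number_autoencoder_parameters_alt decoder_architecture
instance (decoder_architecture : List Int) (out : Int) : Decidable (Spec_get_number_autoencoder_parameters decoder_architecture out) := by unfold Spec_get_number_autoencoder_parameters; infer_instance

-- ===== CLAIM (what is proved, stated in full; the proofs are below) =====
def Claim_equal_get_number_autoencoder_parameters : Prop := ∀ (decoder_architecture : List Int), Dom_get_number_autoencoder_parameters decoder_architecture → Spec_get_number_autoencoder_parameters decoder_architecture (get_number_autoencoder_parameters decoder_architecture)

-- ===== LEMMAS AND PROOFS =====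

-- proof-side recursive view of B's pass
def pvAltGo : List Int → Int
  | x :: y :: t => (x + 1) * y + (y + 1) * x + pvAltGo (y :: t)
  | _ => 0

theorem pv_alt_foldl (t : List Int) : ∀ (acc p : Int),
    (t.foldl
      (fun st y =>
        match st.2 with
        | some prev => (st.1 + (prev + 1) * y + (y + 1) * prev, some y)
        | none => (st.1, some y))
      (acc, some p)).1 = acc + pvAltGo (p :: t) := by
  induction t with
  | nil => intro acc p; simp [pvAltGo]
  | cons y t' ih =>
    intro acc p
    simp only [List.foldl_cons]
    rw [ih (acc + (p + 1) * y + (y + 1) * p) y,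
        show pvAltGo (p :: y :: t') = (p + 1) * y + (y + 1) * p + pvAltGo (y :: t') from rfl]
    ring

theorem pv_alt_eq_go (d : List Int) : get_number_autoencoder_parameters_alt d = pvAltGo d := by
  cases d with
  | nil => simp [get_number_autoencoder_parameters_alt, pvAltGo]
  | cons a t =>
    unfold get_number_autoencoder_parameters_alt
    simp only [List.foldl_cons]
    rw [pv_alt_foldl t 0 a, zero_add]

-- sum of (x+1)*y over adjacent pairs
def pvPairSum : List Int → Int
  | x :: y :: t => (x + 1) * y + pvPairSum (y :: t)
  | _ => 0

-- the cross term at the junction of an append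
def pvLink (as bs : List Int) : Int :=
  match as.getLast?, bs.head? with
  | some x, some y => (x + 1) * y
  | _, _ => 0

theorem pv_foldl_pair (xs : List Int) : ∀ acc : Int,
    (xs.zip xs.tail).foldl (fun n p => n + (p.1 + 1) * p.2) acc = acc + pvPairSum xs := by
  induction xs with
  | nil => intro acc; simp [pvPairSum]
  | cons x t ih =>
    cases t with
    | nil => intro acc; simp [pvPairSum]
    | cons y t' =>
      intro acc
      have h := ih (acc + (x + 1) * y)
      simp only [List.tail_cons] at h ⊢
      simp only [List.zip_cons_cons, List.foldl_cons]
      rw [h, pvPairSum]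
      ring

theorem pv_pairSum_append (as bs : List Int) :
    pvPairSum (as ++ bs) = pvPairSum as + pvLink as bs + pvPairSum bs := by
  induction as with
  | nil => simp [pvPairSum, pvLink]
  | cons a as' ih =>
    cases as' with
    | nil =>
      cases bs with
      | nil => simp [pvPairSum, pvLink]
      | cons b bs' => simp [pvPairSum, pvLink]
    | cons a' as'' =>
      have : (a :: a' :: as'') ++ bs = a :: ((a' :: as'') ++ bs) := rfl
      rw [this]
      have hcons : (a' :: as'') ++ bs = a' :: (as'' ++ bs) := rfl
      rw [hcons] at ih ⊢
      rw [show pvPairSum (a :: a' :: (as'' ++ bs))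
            = (a + 1) * a' + pvPairSum (a' :: (as'' ++ bs)) from rfl, ih]
      have hlink : pvLink (a :: a' :: as'') bs = pvLink (a' :: as'') bs := by
        simp [pvLink, List.getLast?_cons_cons]
      rw [hlink, show pvPairSum (a :: a' :: as'') = (a + 1) * a' + pvPairSum (a' :: as'') from rfl]
      ring

theorem pv_pairSum_reverse_cons (a : Int) (t : List Int) :
    pvPairSum (a :: t).reverse
      = pvPairSum t.reverse + (match t.head? with | some b => (b + 1) * a | none => 0) := by
  rw [List.reverse_cons, pv_pairSum_append]
  have : pvLink t.reverse [a] = (match t.head? with | some b => (b + 1) * a | none => 0) := by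
    simp [pvLink, List.getLast?_reverse]
    cases t.head? <;> simp
  rw [this]
  simp [pvPairSum]

theorem pv_altGo_eq (l : List Int) : pvAltGo l = pvPairSum l + pvPairSum l.reverse := by
  induction l with
  | nil => simp [pvAltGo, pvPairSum]
  | cons a t ih =>
    cases t with
    | nil => simp [pvAltGo, pvPairSum]
    | cons b t' =>
      rw [show pvAltGo (a :: b :: t') = (a + 1) * b + (b + 1) * a + pvAltGo (b :: t') from rfl, ih]
      rw [pv_pairSum_reverse_cons a (b :: t')]
      rw [show pvPairSum (a :: b :: t') = (a + 1) * b + pvPairSum (b :: t') from rfl]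
      simp only [List.head?_cons]
      ring

-- ===== VERDICT (by name: the statement is the Claim_ definition above) =====
theorem get_number_autoencoder_parameters_spec : Claim_equal_get_number_autoencoder_parameters := by
  intro d _
  unfold Spec_get_number_autoencoder_parameters get_number_autoencoder_parameters
  rw [pv_alt_eq_go]
  show (((PySem.List.slice d (some 1) none).reverse ++ d).zip
      (PySem.List.slice ((PySem.List.slice d (some 1) none).reverse ++ d) (some 1) none)).foldl
      (fun n_parameters p => n_parameters + (p.1 + 1) * p.2) 0 = pvAltGo d
  rw [PySem.List.slice_from_one, PySem.List.slice_from_one, pv_foldl_pair, zero_add]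
  cases d with
  | nil => simp [pvPairSum, pvAltGo]
  | cons a t =>
    rw [List.tail_cons, pv_pairSum_append, pv_altGo_eq, pv_pairSum_reverse_cons]
    have : pvLink t.reverse (a :: t)
        = (match t.head? with | some b => (b + 1) * a | none => 0) := by
      simp [pvLink, List.getLast?_reverse]
      cases t.head? <;> simp
    rw [this]
    ring
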